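-- pv_equiv track=rewrite | github.com/NamLeAIT/DNA_storage_4 | ngs_prep_v5.py | xor_nt_sequences
-- ===== SOURCE A (Python) =====
-- from typing import Any, Dict, List, Literal, Optional, Tuple
--
-- MAP = "ACGT"
--
-- INV = {b:i for i,b in enumerate(MAP)}
--
-- def xor_nt_sequences(seqs: List[str]) -> str:
--     if not seqs:
--         return ""
--     L = max(len(s) for s in seqs)
--     out = []
--     for i in range(L):
--         x = 0
--         for s in seqs:
--             b = s[i] if i < len(s) else "A"
--             x ^= INV.get(b, 0)
--         out.append(MAP[x])
--     return "".join(out)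
-- ===== SOURCE B (Python) =====
-- MAP = "ACGT"
-- INV = {b: i for i, b in enumerate(MAP)}
--
-- def _xor_into(acc, s):
--     # merge s into the accumulator array position-wise
--     m = min(len(acc), len(s))
--     return ([acc[i] ^ INV.get(s[i], 0) for i in range(m)]
--             + acc[m:]
--             + [INV.get(c, 0) for c in s[m:]])
--
-- def xor_nt_sequences(seqs):
--     if not seqs:
--         return ""
--     acc = []
--     for s in seqs:
--         acc = _xor_into(acc, s)
--     return "".join(MAP[x] for x in acc)
-- ===== Notes on version B (the rewrite author's own statement) =====
-- stated objective: alternative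
-- what changed: Replaces A's position-major nested loops (for each column, rescan every sequence with explicit past-end padding) by a sequence-major single pass that merges each sequence once into a growing integer accumulator array, then maps the array to letters.
import Mathlib
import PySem

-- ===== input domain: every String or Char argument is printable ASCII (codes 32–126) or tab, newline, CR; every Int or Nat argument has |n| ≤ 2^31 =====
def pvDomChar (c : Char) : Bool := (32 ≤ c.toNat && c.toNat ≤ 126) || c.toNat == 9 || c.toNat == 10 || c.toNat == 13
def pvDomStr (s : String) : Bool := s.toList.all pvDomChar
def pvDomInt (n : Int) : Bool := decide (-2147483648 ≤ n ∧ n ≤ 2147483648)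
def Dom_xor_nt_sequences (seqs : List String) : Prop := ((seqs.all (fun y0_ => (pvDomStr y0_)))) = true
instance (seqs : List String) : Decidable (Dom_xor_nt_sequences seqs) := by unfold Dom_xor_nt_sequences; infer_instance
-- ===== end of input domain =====

-- B replaces A's position-major double loop (recomputing every column's xor by scanning all
-- sequences) by a sequence-major single pass that merges each sequence into one integer
-- accumulator array; objective: alternative decomposition (one traversal per sequence).

-- ===== PORT A =====
-- MAP = "ACGT"
def pvMAP : List Char := ['A', 'C', 'G', 'T']

-- INV = {b:i for i,b in enumerate(MAP)}  (codes kept as Nat; they are always 0..3)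
def pvINV : PySem.Dict Char Nat :=
  (pvMAP.zipIdx).foldl (fun d p => d.insert p.1 p.2) PySem.Dict.empty

-- INV.get(b, 0)
def pvInvGet (c : Char) : Nat := PySem.Dict.getD pvINV c 0

-- literal port of A: for i in range(L): x = 0; for s in seqs: x ^= INV.get(b,0); out.append(MAP[x])
-- (x is always < 4, so the unreachable default of pvMAP.getD never fires; "".join of the
--  appended one-character strings is built directly as the List Char of a String)
def xor_nt_sequences (seqs : List String) : String :=
  if seqs = [] then "" else
    let L : Nat := (PySem.List.max? (seqs.map (fun s => s.toList.length)) (fun x => x)).getD 0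
    let out : List Char :=
      (List.range L).foldl
        (fun out i =>
          let x := seqs.foldl
            (fun x s =>
              let b : Char := if i < s.toList.length then s.toList.getD i 'A' else 'A'
              x ^^^ pvInvGet b) 0
          out ++ [pvMAP.getD x 'A']) []
    String.ofList out

-- ===== PORT B =====
-- _xor_into(acc, s): [acc[i] ^ INV.get(s[i],0) for i in range(m)] + acc[m:] + [INV.get(c,0) for c in s[m:]]
def pvXorInto (acc : List Nat) (cs : List Char) : List Nat :=
  let m := min acc.length cs.length
  ((List.range m).map (fun i => acc.getD i 0 ^^^ pvInvGet (cs.getD i 'A')))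
    ++ acc.drop m
    ++ (cs.drop m).map (fun c => pvInvGet c)

-- literal port of B: acc = []; for s in seqs: acc = _xor_into(acc, s); join MAP[x] over acc
def xor_nt_sequences_alt (seqs : List String) : String :=
  if seqs = [] then "" else
    String.ofList ((seqs.foldl (fun a s => pvXorInto a s.toList) []).map (fun x => pvMAP.getD x 'A'))

-- ===== PRECONDITION & SPEC =====
def Spec_xor_nt_sequences (seqs : List String) (out : String) : Prop := out = xor_nt_sequences_alt seqs
instance (seqs : List String) (out : String) : Decidable (Spec_xor_nt_sequences seqs out) := by unfold Spec_xor_nt_sequences; infer_instance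

-- ===== CLAIM (what is proved, stated in full; the proofs are below) =====
def Claim_equal_xor_nt_sequences : Prop := ∀ (seqs : List String), Dom_xor_nt_sequences seqs → Spec_xor_nt_sequences seqs (xor_nt_sequences seqs)

-- ===== LEMMAS AND PROOFS =====

-- per-column contribution of one sequence
def pvCol (cs : List Char) (i : Nat) : Nat :=
  if i < cs.length then pvInvGet (cs.getD i 'A') else 0

-- recursive merge equal to pvXorInto
def pvZL : List Nat → List Char → List Nat
  | [], cs => cs.map (fun c => pvInvGet c)
  | a, [] => a
  | x :: a, c :: cs => (x ^^^ pvInvGet c) :: pvZL a cs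

theorem pvInvGet_A : pvInvGet 'A' = 0 := by rfl

theorem pvXorInto_eq_zl (a : List Nat) (cs : List Char) : pvXorInto a cs = pvZL a cs := by
  induction a generalizing cs with
  | nil => cases cs <;> simp [pvXorInto, pvZL]
  | cons x a ih =>
    cases cs with
    | nil => simp [pvXorInto, pvZL]
    | cons c cs =>
      have hmin : min (x :: a).length ((c :: cs).length) = min a.length cs.length + 1 := by
        simp
      show pvXorInto (x :: a) (c :: cs) = (x ^^^ pvInvGet c) :: pvZL a cs
      rw [← ih cs, pvXorInto, pvXorInto]
      simp only [hmin, List.range_succ_eq_map, List.map_cons, List.map_map, List.drop_succ_cons]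
      simp [Function.comp_def]

theorem pvZL_getD (a : List Nat) (cs : List Char) (i : Nat) :
    (pvZL a cs).getD i 0 = a.getD i 0 ^^^ pvCol cs i := by
  induction a generalizing cs i with
  | nil =>
    by_cases hi : i < cs.length
    · simp [pvZL, List.getD, pvCol, hi]
    · have h : cs[i]? = none := by
        rw [List.getElem?_eq_none_iff]; omega
      simp [pvZL, List.getD, pvCol, hi]
  | cons x a ih =>
    cases cs with
    | nil => simp [pvZL, pvCol]
    | cons c cs =>
      cases i with
      | zero => simp [pvZL, pvCol]
      | succ i =>
        rw [pvZL, List.getD_cons_succ, List.getD_cons_succ, ih]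
        have : pvCol (c :: cs) (i + 1) = pvCol cs i := by
          simp only [pvCol, List.length_cons, List.getD_cons_succ]
          by_cases hi : i < cs.length <;> simp [hi]
        rw [this]

theorem pvZL_length (a : List Nat) (cs : List Char) :
    (pvZL a cs).length = max a.length cs.length := by
  induction a generalizing cs with
  | nil => cases cs <;> simp [pvZL]
  | cons x a ih =>
    cases cs with
    | nil => simp [pvZL]
    | cons c cs => simp [pvZL, ih]

theorem pvFold_getD (seqs : List String) (a : List Nat) (i : Nat) :
    (seqs.foldl (fun a s => pvZL a s.toList) a).getD i 0
      = seqs.foldl (fun x s => x ^^^ pvCol s.toList i) (a.getD i 0) := by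
  induction seqs generalizing a with
  | nil => rfl
  | cons s seqs ih =>
    rw [List.foldl_cons, List.foldl_cons, ih, pvZL_getD]

theorem pvFold_length (seqs : List String) (a : List Nat) :
    (seqs.foldl (fun a s => pvZL a s.toList) a).length
      = seqs.foldl (fun L s => max L s.toList.length) a.length := by
  induction seqs generalizing a with
  | nil => rfl
  | cons s seqs ih =>
    rw [List.foldl_cons, List.foldl_cons, ih, pvZL_length]

theorem pvFoldAppend (g : Nat -> Char) (l : List Nat) (init : List Char) :
    l.foldl (fun out i => out ++ [g i]) init = init ++ l.map g := by
  induction l generalizing init with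
  | nil => simp
  | cons x l ih => simp [List.foldl_cons, ih]

-- the inner loop of A computes the column xor, written with pvCol
theorem pvColStep (seqs : List String) (i : Nat) (x0 : Nat) :
    seqs.foldl
      (fun x s =>
        let b : Char := if i < s.toList.length then s.toList.getD i 'A' else 'A'
        x ^^^ pvInvGet b) x0
      = seqs.foldl (fun x s => x ^^^ pvCol s.toList i) x0 := by
  induction seqs generalizing x0 with
  | nil => rfl
  | cons s seqs ih =>
    simp only [List.foldl_cons, ih]
    congr 1
    by_cases h : i < s.toList.length
    · rw [pvCol, if_pos h, if_pos h]
    · rw [pvCol, if_neg h, if_neg h, pvInvGet_A]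

-- ===== VERDICT (by name: the statement is the Claim_ definition above) =====
theorem xor_nt_sequences_spec : Claim_equal_xor_nt_sequences := by
  intro seqs _
  unfold Spec_xor_nt_sequences xor_nt_sequences xor_nt_sequences_alt
  rcases seqs with _ | ⟨s0, rest⟩
  · rfl
  · simp only [if_neg (by simp : ¬ (s0 :: rest = []))]
    have hzl : ∀ (a : List Nat) (ss : List String),
        ss.foldl (fun a s => pvXorInto a s.toList) a
          = ss.foldl (fun a s => pvZL a s.toList) a := by
      intro a ss
      induction ss generalizing a with
      | nil => rfl
      | cons s ss ih => rw [List.foldl_cons, List.foldl_cons, pvXorInto_eq_zl, ih]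
    rw [hzl]
    set acc := (s0 :: rest).foldl (fun a s => pvZL a s.toList) ([] : List Nat) with hacc
    have hL : (PySem.List.max? ((s0 :: rest).map (fun s => s.toList.length)) (fun x => x)).getD 0
        = acc.length := by
      rw [hacc, pvFold_length]
      rw [List.map_cons, PySem.List.max?_id_cons, Option.getD_some]
      simp only [List.foldl_cons, List.length_nil, Nat.max_comm 0, Nat.max_zero]
      rw [List.foldl_map]
    rw [hL, pvFoldAppend, List.nil_append]
    congr 1
    apply List.ext_getElem
    · simp
    · intro i h1 h2
      simp only [List.length_map] at h2
      simp only [List.getElem_map, List.getElem_range]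
      congr 1
      rw [pvColStep]
      have hg := pvFold_getD (s0 :: rest) [] i
      rw [← hacc] at hg
      have hd : acc.getD i 0 = acc[i] := List.getD_eq_getElem acc 0 h2

      rw [← hd, hg]
      rfl
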